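-- pv_equiv track=rewrite | github.com/evbernardes/pyShapeDetector | pyShapeDetector/utility/helpers_internal.py | combine_indices_to_remove
-- ===== SOURCE A (Python) =====
-- import copy
--
-- def combine_indices_to_remove(idx_groups):
--     """
--     Combine multiple lists of indices to be removed.
--
--     For example, suppose you have:
--         input = ['a', 'b', 'c', 'd', 'e', 'f']
--
--     And you want to remove the elements at indices [0, 3]. You end up with:
--         step1 = [_, 'b', 'c', _, 'e', 'f']  # removed input[0] and input[3]
--
--     Let's say you later also remove the elements [1, 3] from this new list:
--         step2 = ['b', _, 'e', _]  # removed step1[1] and step1[3]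
--
--     If you want to remove the same elements at a single step, you must remove
--     the elements at indices [0, 2, 3, 5].
--
--     This function calculates this modified and combined indices list.
--
--     Parameters
--     ----------
--     idx_groups: list
--         List containing sublists of integers.
--
--     Returns
--     -------
--     list of integers
--
--     """
--     if not isinstance(idx_groups, list):
--         raise ValueError(f"Expected list of lists, got {type(idx_groups)}.")
--
--     for indices in idx_groups:
--         if not isinstance(indices, list):
--             raise ValueError(f"Expected list of lists, got {type(indices)}.")
--
--         for idx in indices:
--             if not isinstance(idx, int):
--                 raise ValueError(f"Expected integers, got {idx}.")
--
--     indices = []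
--     if len(idx_groups) > 0:
--         N = sum([len(idx_group) for idx_group in idx_groups])
--         lim = max([i for idx_group in idx_groups for i in idx_group])
--         dummy_values_1 = list(range(N + lim))
--         dummy_values_2 = copy.deepcopy(dummy_values_1)
--
--         for idx_group in idx_groups:
--             for i in idx_group[::-1]:
--                 elem = dummy_values_1.pop(i)
--                 indices.append(dummy_values_2.index(elem))
--
--     return sorted(indices)
-- ===== SOURCE B (Python) =====
-- def combine_indices_to_remove(idx_groups):
--     if not isinstance(idx_groups, list):
--         raise ValueError(f"Expected list of lists, got {type(idx_groups)}.")
--     for indices in idx_groups: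
--         if not isinstance(indices, list):
--             raise ValueError(f"Expected list of lists, got {type(indices)}.")
--         for idx in indices:
--             if not isinstance(idx, int):
--                 raise ValueError(f"Expected integers, got {idx}.")
--
--     if not idx_groups:
--         return []
--     flat = [i for g in idx_groups for i in g]
--     M = len(flat) + max(flat)  # size of the virtual original list
--
--     removed = []  # sorted list of absolute (original) indices removed so far
--     for g in idx_groups:
--         for r in reversed(g):
--             if r < 0:
--                 r += M - len(removed)
--             # map the relative index r to the r-th still-remaining absolute
--             # index, and find where it goes in the sorted `removed` list
--             a, pos = r, 0
--             for x in removed: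
--                 if x <= a:
--                     a += 1
--                     pos += 1
--             removed.insert(pos, a)
--     return removed
-- ===== Notes on version B (the rewrite author's own statement) =====
-- stated objective: alternative
-- what changed: Instead of materialising a dummy list of length N+max and simulating removals with list.pop plus a linear list.index scan, B keeps only a sorted list of the absolute indices removed so far and maps each relative index to its absolute position by a single scan of that short list, inserting in order; the final list is already sorted.
import Mathlib
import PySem

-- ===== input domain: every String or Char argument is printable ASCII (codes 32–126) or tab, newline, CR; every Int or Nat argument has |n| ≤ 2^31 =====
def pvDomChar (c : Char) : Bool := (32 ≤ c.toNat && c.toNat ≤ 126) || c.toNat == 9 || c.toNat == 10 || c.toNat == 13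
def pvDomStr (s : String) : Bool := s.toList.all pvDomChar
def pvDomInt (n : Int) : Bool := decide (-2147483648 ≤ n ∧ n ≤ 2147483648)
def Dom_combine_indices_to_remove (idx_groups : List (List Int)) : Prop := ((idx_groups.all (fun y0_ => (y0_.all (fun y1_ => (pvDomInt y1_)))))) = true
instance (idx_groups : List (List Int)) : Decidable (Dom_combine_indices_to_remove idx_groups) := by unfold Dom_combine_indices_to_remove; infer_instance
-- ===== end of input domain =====

-- B replaces A's dummy-list simulation (a list of length N+max, pop + linear index scan)
-- by a sorted list of the removed absolute indices, mapping each relative index with one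
-- scan of that short list; objective: alternative (no structure of size N+max is built).


-- ===== PORT A =====
-- Literal port of A: builds dummy_values_1 = list(range(N+lim)), pops each relative
-- index from it (idx_group[::-1]) and records dummy_values_2.index(popped element).
-- Where Python raises (max of an empty sequence, pop index out of range) the port keeps
-- a default state; those inputs are excluded by Pre_.
def combine_indices_to_remove (idx_groups : List (List Int)) : List Int :=
  let indices : List Int := []
  if idx_groups.length > 0 then
    let N : Int := (idx_groups.map (fun idx_group => PySem.List.len idx_group)).sum
    match PySem.List.max? idx_groups.flatten (fun i => i) with
    | none => indices        -- Python: ValueError from max([]) — excluded by Pre_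
    | some lim =>
      let dummy_values_1 := PySem.List.pyRange 0 (N + lim) 1
      let dummy_values_2 := PySem.List.pyRange 0 (N + lim) 1
      let st := idx_groups.foldl (fun (st : List Int × List Int) idx_group =>
        ((PySem.List.slice? idx_group none none (-1)).getD []).foldl
          (fun (st : List Int × List Int) i =>
            match PySem.List.pop? st.1 i with
            | none => st     -- Python: IndexError — excluded by Pre_
            | some (elem, rest) =>
              match PySem.List.index? dummy_values_2 elem with
              | none => (rest, st.2)   -- Python: ValueError — unreachable
              | some j => (rest, st.2 ++ [(j : Int)])) st) (dummy_values_1, indices)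
      PySem.List.sorted st.2 (fun i => i) false
  else indices

-- ===== PORT B =====
-- Port of B: `removed` is the sorted list of absolute indices removed so far; a relative
-- index r maps to the r-th still-remaining absolute index, found by scanning `removed`.
def combine_indices_to_remove_alt (idx_groups : List (List Int)) : List Int :=
  if idx_groups = [] then []
  else
    let flat := idx_groups.flatten
    match PySem.List.max? flat (fun i => i) with
    | none => []             -- Python: ValueError from max([]) — excluded by Pre_
    | some mx =>
      let M : Int := (flat.length : Int) + mx
      idx_groups.foldl (fun removed g =>
        g.reverse.foldl (fun removed r =>
          let r' : Int := if r < 0 then r + (M - removed.length) else r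
          let ap := removed.foldl
            (fun (ap : Int × Int) x => if x ≤ ap.1 then (ap.1 + 1, ap.2 + 1) else ap)
            (r', 0)
          PySem.List.insert removed ap.2 ap.1) removed) []

-- ===== PRECONDITION & SPEC =====
-- the sequence of pop indices, in the order A performs the pops
def pvSeq (idx_groups : List (List Int)) : List Int := (idx_groups.map List.reverse).flatten
-- len(dummy_values_1) before any pop: N + max of all indices
def pvM (idx_groups : List (List Int)) : Int :=
  (idx_groups.flatten.length : Int) +
    ((PySem.List.max? idx_groups.flatten (fun i => i)).getD 0)
-- Pre_ excludes exactly the inputs where A raises: a non-empty idx_groups whose sublists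
-- are all empty (ValueError from max([])), and inputs whose k-th pop index falls outside
-- the current dummy-list length N+lim-k (IndexError from list.pop).
def Pre_combine_indices_to_remove (idx_groups : List (List Int)) : Prop :=
  idx_groups = [] ∨
  (idx_groups.flatten ≠ [] ∧
   ∀ (n : Nat) (hn : n < (pvSeq idx_groups).length),
     -(pvM idx_groups - n) ≤ (pvSeq idx_groups)[n] ∧
       (pvSeq idx_groups)[n] < pvM idx_groups - n)
instance (idx_groups : List (List Int)) : Decidable (Pre_combine_indices_to_remove idx_groups) := by
  unfold Pre_combine_indices_to_remove; infer_instance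
def pvWitness_combine_indices_to_remove : List (List Int) := [[0, 3], [1, 3]]
def Spec_combine_indices_to_remove (idx_groups : List (List Int)) (out : List Int) : Prop := out = combine_indices_to_remove_alt idx_groups
instance (idx_groups : List (List Int)) (out : List Int) : Decidable (Spec_combine_indices_to_remove idx_groups out) := by unfold Spec_combine_indices_to_remove; infer_instance

-- ===== CLAIM =====
def Claim_equal_combine_indices_to_remove : Prop := ∀ (idx_groups : List (List Int)), Dom_combine_indices_to_remove idx_groups → Pre_combine_indices_to_remove idx_groups → Spec_combine_indices_to_remove idx_groups (combine_indices_to_remove idx_groups)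

-- ===== LEMMAS AND PROOFS =====

def pvRem (lo M : Int) (R : List Int) : List Int :=
  (PySem.List.pyRange lo M 1).filter (fun v => decide (v ∉ R))

lemma pvRem_nil (lo M : Int) : pvRem lo M [] = PySem.List.pyRange lo M 1 := by
  simp [pvRem]

lemma pvRem_cons (lo M x : Int) (R : List Int)
    (hlo : lo ≤ x) (hxM : x < M) (hgt : ∀ y ∈ R, x < y) :
    pvRem lo M (x :: R) = PySem.List.pyRange lo x 1 ++ pvRem (x + 1) M R := by
  unfold pvRem
  rw [PySem.List.pyRange_one_append lo x M hlo (by omega),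
      PySem.List.pyRange_one_cons (by omega : x < M)]
  rw [List.filter_append, List.filter_cons]
  simp only [List.mem_cons, not_or]
  have h1 : ∀ v ∈ PySem.List.pyRange lo x 1, (decide (¬v = x ∧ v ∉ R)) = true := by
    intro v hv
    rw [PySem.List.mem_pyRange_one] at hv
    have : v ∉ R := fun hm => absurd (hgt v hm) (by omega)
    simp [this]; omega
  rw [List.filter_eq_self.mpr h1]
  simp only [not_true_eq_false, false_and, decide_false, Bool.false_eq_true, if_false]
  congr 1
  apply List.filter_congr
  intro v hv
  rw [PySem.List.mem_pyRange_one] at hv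
  simp only [decide_eq_decide]
  constructor
  · rintro ⟨_, h⟩; exact h
  · intro h; exact ⟨by omega, h⟩

lemma pvRem_length (lo M : Int) (R : List Int) (hs : R.Pairwise (· < ·))
    (hb : ∀ x ∈ R, lo ≤ x ∧ x < M) (hlo : lo ≤ M) :
    (pvRem lo M R).length + R.length = (M - lo).toNat := by
  induction R generalizing lo with
  | nil => simp [pvRem_nil, PySem.List.length_pyRange_one]
  | cons x R ih =>
    have hbx := hb x (by simp)
    rw [pvRem_cons lo M x R hbx.1 hbx.2 (by
      intro y hy; exact (List.pairwise_cons.mp hs).1 y hy)]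
    rw [List.length_append, PySem.List.length_pyRange_one]
    have hIH := ih (x+1) (List.pairwise_cons.mp hs).2 (fun y hy => by
      have h3 := hb y (by simp [hy]); have h4 := (List.pairwise_cons.mp hs).1 y hy
      constructor <;> omega) (by omega)
    simp only [List.length_cons]
    omega

lemma pvFilter_eraseIdx (L : List Int) (k : Nat) (a : Int)
    (hnd : L.Nodup) (hk : k < L.length) (ha : L[k] = a) :
    L.filter (fun v => decide (v ≠ a)) = L.eraseIdx k := by
  induction L generalizing k with
  | nil => simp at hk
  | cons x L ih =>
    cases k with
    | zero =>
      simp at ha; subst ha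
      simp only [List.filter_cons, List.eraseIdx_cons_zero]
      simp only [ne_eq, not_true_eq_false, decide_false]
      exact List.filter_eq_self.mpr (fun v hv => by
        simp; rintro rfl; exact (List.nodup_cons.mp hnd).1 hv)
    | succ k =>
      simp only [List.getElem_cons_succ] at ha
      simp only [List.filter_cons, List.eraseIdx_cons_succ]
      have hxa : (decide (x ≠ a)) = true := by
        simp; rintro rfl
        exact (List.nodup_cons.mp hnd).1 (ha ▸ List.getElem_mem _)
      rw [hxa]
      simp only [if_true]
      rw [ih k (List.nodup_cons.mp hnd).2 (by simp at hk; omega) ha]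

lemma pvIndex_pyRange (lo hi v : Int) (h1 : lo ≤ v) (h2 : v < hi) :
    PySem.List.index? (PySem.List.pyRange lo hi 1) v = some (v - lo).toNat := by
  have h : ∀ (n : Nat) (lo : Int), lo ≤ v → v < hi → (hi - lo).toNat = n →
      PySem.List.index? (PySem.List.pyRange lo hi 1) v = some (v - lo).toNat := by
    intro n
    induction n with
    | zero => intro lo h1 h2 hn; omega
    | succ n ih =>
      intro lo h1 h2 hn
      rw [PySem.List.pyRange_one_cons (by omega)]
      by_cases hv : lo = v
      · subst hv; rw [PySem.List.index?_cons_self]; simp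
      · rw [PySem.List.index?_cons_of_ne _ hv]
        rw [ih (lo + 1) (by omega) h2 (by omega)]
        simp; omega
  exact h (hi - lo).toNat lo h1 h2 rfl


def pvScan : (Int × Int) → Int → (Int × Int) :=
  fun ap x => if x ≤ ap.1 then (ap.1 + 1, ap.2 + 1) else ap

lemma pvScan_const (R : List Int) (a p0 : Int) (h : ∀ x ∈ R, a < x) :
    R.foldl pvScan (a, p0) = (a, p0) := by
  induction R with
  | nil => rfl
  | cons x R ih =>
    have hx := h x (by simp)
    simp only [List.foldl_cons, pvScan, if_neg (by omega : ¬ x ≤ a)]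
    exact ih (fun y hy => h y (by simp [hy]))

lemma pvRem_mem {lo M y : Int} {R : List Int} (h : y ∈ pvRem lo M R) :
    lo ≤ y ∧ y < M ∧ y ∉ R := by
  unfold pvRem at h
  have h1 := PySem.List.mem_pyRange_one.mp (List.mem_of_mem_filter h)
  have h2 := List.of_mem_filter h
  simp at h2
  exact ⟨h1.1, h1.2, h2⟩

lemma pvSelect (M : Int) (R : List Int) (lo p0 : Int) (k : Nat)
    (hs : R.Pairwise (· < ·)) (hb : ∀ x ∈ R, lo ≤ x ∧ x < M)
    (hk : k < (pvRem lo M R).length) :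
    R.foldl pvScan (lo + k, p0)
      = ((pvRem lo M R).getD k 0,
          p0 + (R.countP (fun x => decide (x < (pvRem lo M R).getD k 0))))
      := by
  induction R generalizing lo k p0 with
  | nil =>
    rw [pvRem_nil] at hk ⊢
    rw [List.getD_eq_getElem _ _ hk, PySem.List.getElem_pyRange_one]
    simp
  | cons x R ih =>
    obtain ⟨hs1, hs2⟩ := List.pairwise_cons.mp hs
    have hbx := hb x (by simp)
    have hsplit := pvRem_cons lo M x R hbx.1 hbx.2 hs1
    have hlen1 : (PySem.List.pyRange lo x 1).length = (x - lo).toNat :=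
      PySem.List.length_pyRange_one lo x
    rw [hsplit] at hk ⊢
    by_cases hc : (lo + k : Int) < x
    · -- k lands in the first segment; scan leaves the state unchanged
      have hkx : k < (PySem.List.pyRange lo x 1).length := by omega
      have hget : (PySem.List.pyRange lo x 1 ++ pvRem (x + 1) M R).getD k 0 = lo + k := by
        unfold List.getD
        rw [List.getElem?_append_left hkx]
        rw [List.getElem?_eq_getElem hkx, PySem.List.getElem_pyRange_one]
        rfl
      rw [hget]
      rw [pvScan_const (x :: R) (lo + k) p0 (fun y hy => by
        rcases List.mem_cons.mp hy with rfl | hy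
        · omega
        · have := hs1 y hy; omega)]
      have hcnt : (x :: R).countP (fun y => decide (y < lo + k)) = 0 := by
        rw [List.countP_eq_zero]
        intro y hy
        rcases List.mem_cons.mp hy with rfl | hy
        · simp; omega
        · have := hs1 y hy; simp; omega
      rw [hcnt]; simp
    · -- x ≤ lo + k : the scan consumes x and recurses with lo := x + 1
      have hk' : k - (x - lo).toNat < (pvRem (x + 1) M R).length := by
        rw [List.length_append, hlen1] at hk; omega
      have hb' : ∀ y ∈ R, x + 1 ≤ y ∧ y < M := fun y hy =>
        ⟨by have := hs1 y hy; omega, (hb y (by simp [hy])).2⟩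
      have hstart : (x + 1) + ((k - (x - lo).toNat : Nat) : Int) = lo + k + 1 := by omega
      have hget : (PySem.List.pyRange lo x 1 ++ pvRem (x + 1) M R).getD k 0
          = (pvRem (x + 1) M R).getD (k - (x - lo).toNat) 0 := by
        rw [List.getD_append_right _ _ _ _ (by omega), hlen1]
      rw [hget]
      have hgea : x + 1 ≤ (pvRem (x + 1) M R).getD (k - (x - lo).toNat) 0 := by
        have hm : (pvRem (x + 1) M R).getD (k - (x - lo).toNat) 0 ∈ pvRem (x + 1) M R := by
          rw [List.getD_eq_getElem _ _ hk']
          exact List.getElem_mem _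
        exact (pvRem_mem hm).1
      simp only [List.foldl_cons, pvScan, if_pos (by omega : x ≤ lo + (k : Int))]
      have hrec := ih (x + 1) (p0 + 1) (k - (x - lo).toNat) hs2 hb' hk'
      rw [show lo + (k : Int) + 1 = (x + 1) + ((k - (x - lo).toNat : Nat) : Int) from by omega]
      rw [hrec]
      congr 1
      rw [List.countP_cons]
      simp only [decide_eq_true_eq]
      rw [if_pos (by omega)]
      omega

lemma pvInsert_sorted (R : List Int) (a : Int) (hs : R.Pairwise (· < ·)) (ha : a ∉ R) :
    (R.take (R.countP (fun x => decide (x < a)))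
      ++ a :: R.drop (R.countP (fun x => decide (x < a)))).Pairwise (· < ·) := by
  induction R with
  | nil => simp
  | cons x R ih =>
    obtain ⟨hs1, hs2⟩ := List.pairwise_cons.mp hs
    have hxa : x ≠ a := fun h => ha (by simp [h])
    rw [List.countP_cons]
    by_cases hc : x < a
    · simp only [decide_eq_true_eq, if_pos hc, List.take_succ_cons, List.drop_succ_cons,
        List.cons_append]
      rw [List.pairwise_cons]
      refine ⟨?_, ih hs2 (fun h => ha (by simp [h]))⟩
      intro y hy
      rcases List.mem_append.mp hy with hy | hy
      · exact hs1 y (List.mem_of_mem_take hy)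
      · rcases List.mem_cons.mp hy with rfl | hy
        · exact hc
        · exact hs1 y (List.mem_of_mem_drop hy)
    · have hcnt : R.countP (fun x => decide (x < a)) = 0 := by
        rw [List.countP_eq_zero]
        intro y hy
        have := hs1 y hy
        simp; omega
      simp only [decide_eq_true_eq, if_neg hc, Nat.add_zero, hcnt, List.take_zero,
        List.drop_zero, List.nil_append]
      rw [List.pairwise_cons]
      refine ⟨?_, hs⟩
      intro y hy
      rcases List.mem_cons.mp hy with rfl | hy
      · omega
      · have := hs1 y hy; omega


def pvStepA (M : Int) (st : List Int × List Int) (i : Int) : List Int × List Int :=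
  match PySem.List.pop? st.1 i with
  | none => st
  | some (elem, rest) =>
    match PySem.List.index? (PySem.List.pyRange 0 M 1) elem with
    | none => (rest, st.2)
    | some j => (rest, st.2 ++ [(j : Int)])

def pvStepB (M : Int) (removed : List Int) (r : Int) : List Int :=
  let r' : Int := if r < 0 then r + (M - removed.length) else r
  let ap := removed.foldl
    (fun (ap : Int × Int) x => if x ≤ ap.1 then (ap.1 + 1, ap.2 + 1) else ap)
    (r', 0)
  PySem.List.insert removed ap.2 ap.1

lemma pvRem_nodup (lo M : Int) (R : List Int) : (pvRem lo M R).Nodup :=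
  (PySem.List.nodup_pyRange_one lo M).filter _

lemma pvRem_insert (M a : Int) (R : List Int) (k : Nat) (hk : k < (pvRem 0 M R).length)
    (ha : (pvRem 0 M R)[k] = a) :
    pvRem 0 M (R.take (R.countP (fun x => decide (x < a)))
        ++ a :: R.drop (R.countP (fun x => decide (x < a))))
      = (pvRem 0 M R).eraseIdx k := by
  have hmem : ∀ v : Int,
      (v ∈ R.take (R.countP (fun x => decide (x < a)))
        ++ a :: R.drop (R.countP (fun x => decide (x < a)))) ↔ (v = a ∨ v ∈ R) := by
    intro v
    constructor
    · intro h
      rcases List.mem_append.mp h with h | h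
      · exact Or.inr (List.mem_of_mem_take h)
      · rcases List.mem_cons.mp h with rfl | h
        · exact Or.inl rfl
        · exact Or.inr (List.mem_of_mem_drop h)
    · intro h
      rcases h with rfl | h
      · exact List.mem_append.mpr (Or.inr (by simp))
      · rcases (List.mem_append.mp ((List.take_append_drop
            (R.countP (fun x => decide (x < a))) R).symm ▸ h)) with h | h
        · exact List.mem_append.mpr (Or.inl h)
        · exact List.mem_append.mpr (Or.inr (by simp [h]))
  have h1 : pvRem 0 M (R.take (R.countP (fun x => decide (x < a)))
        ++ a :: R.drop (R.countP (fun x => decide (x < a))))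
      = (pvRem 0 M R).filter (fun v => decide (v ≠ a)) := by
    unfold pvRem
    rw [List.filter_filter]
    apply List.filter_congr
    intro v _
    by_cases hva : v = a
    · subst hva
      simp [hmem]
    · by_cases hvR : v ∈ R <;> simp [hmem, hva, hvR]
  rw [h1]
  exact pvFilter_eraseIdx _ k a (pvRem_nodup 0 M R) hk ha

lemma pvStep (M : Int) (R acc : List Int) (i : Int)
    (hs : R.Pairwise (· < ·)) (hb : ∀ x ∈ R, 0 ≤ x ∧ x < M)
    (h1 : -(M - R.length) ≤ i) (h2 : i < M - R.length) :
    ∃ a, pvStepA M (pvRem 0 M R, acc) i = (pvRem 0 M (pvStepB M R i), acc ++ [a]) ∧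
      (pvStepB M R i).Perm (a :: R) ∧ (pvStepB M R i).Pairwise (· < ·) ∧
      (∀ x ∈ pvStepB M R i, 0 ≤ x ∧ x < M) := by
  have hM : (R.length : Int) < M := by omega
  have hlen : (pvRem 0 M R).length + R.length = M.toNat := by
    have := pvRem_length 0 M R hs hb (by omega)
    omega
  set L := pvRem 0 M R with hL
  set r' : Int := if i < 0 then i + (M - R.length) else i with hr'
  have hr0 : 0 ≤ r' := by rw [hr']; split <;> omega
  have hrlt : r' < (L.length : Int) := by rw [hr']; split <;> omega
  set k : Nat := r'.toNat with hk
  have hkL : k < L.length := by omega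
  -- the pop
  have hidx : PySem.List.pyIdx? L.length i = some k := by
    unfold PySem.List.pyIdx?
    by_cases hi : 0 ≤ i
    · rw [if_pos hi, if_pos (by omega)]
      congr 1; omega
    · rw [if_neg hi, if_pos (by omega)]
      congr 1; omega
  have hpop : PySem.List.pop? L i = some (L[k], L.eraseIdx k) := by
    unfold PySem.List.pop?
    rw [hidx]
    simp [List.getElem?_eq_getElem hkL]
  set a : Int := L[k] with ha
  have haL : a ∈ L := ha ▸ List.getElem_mem hkL
  have habounds := pvRem_mem haL
  -- the index? call
  have hindex : PySem.List.index? (PySem.List.pyRange 0 M 1) a = some a.toNat := by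
    rw [pvIndex_pyRange 0 M a habounds.1 habounds.2.1]
    congr 1; omega
  -- the scan
  set c : Nat := R.countP (fun x => decide (x < a)) with hc
  have hscan : R.foldl pvScan (r', 0) = (a, (c : Int)) := by
    have := pvSelect M R 0 0 k hs hb (by rw [← hL]; omega)
    rw [show (0 : Int) + (k : Int) = r' from by omega] at this
    rw [← hL] at this
    rw [this, List.getD_eq_getElem _ _ hkL, ← ha, ← hc]
    simp
  have hcle : c ≤ R.length := hc ▸ List.countP_le_length
  have hBeq : pvStepB M R i = R.take c ++ a :: R.drop c := by
    show PySem.List.insert R (List.foldl pvScan (r', 0) R).2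
        (List.foldl pvScan (r', 0) R).1 = _
    rw [hscan]
    exact PySem.List.insert_natCast R c a hcle
  have hanotR : a ∉ R := habounds.2.2
  have hperm : (pvStepB M R i).Perm (a :: R) := by
    rw [hBeq]
    calc (R.take c ++ a :: R.drop c).Perm (a :: (R.take c ++ R.drop c)) := List.perm_middle
      _ = a :: R := by rw [List.take_append_drop]
  refine ⟨a, ?_, hperm, ?_, ?_⟩
  · have hcast : ((a.toNat : Nat) : Int) = a := by
      have := habounds.1; omega
    unfold pvStepA
    simp only [hpop, hindex]
    rw [hcast, hBeq, hc]
    rw [pvRem_insert M a R k hkL ha.symm]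
  · rw [hBeq, hc]
    exact pvInsert_sorted R a hs hanotR
  · intro x hx
    rcases List.mem_cons.mp (hperm.subset hx) with rfl | hx
    · exact ⟨habounds.1, habounds.2.1⟩
    · exact hb x hx


lemma pvMain (M : Int) : ∀ (seq R acc : List Int),
    R.Pairwise (· < ·) → (∀ x ∈ R, 0 ≤ x ∧ x < M) → acc.Perm R →
    (∀ (n : Nat) (hn : n < seq.length),
        -(M - (R.length + n)) ≤ seq[n] ∧ seq[n] < M - (R.length + n)) →
    (seq.foldl (pvStepA M) (pvRem 0 M R, acc)).1
        = pvRem 0 M (seq.foldl (pvStepB M) R) ∧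
    (seq.foldl (pvStepA M) (pvRem 0 M R, acc)).2.Perm (seq.foldl (pvStepB M) R) ∧
    (seq.foldl (pvStepB M) R).Pairwise (· < ·) := by
  intro seq
  induction seq with
  | nil => exact fun R acc hs hb hp _ => ⟨rfl, hp, hs⟩
  | cons i seq ih =>
    intro R acc hs hb hp hpre
    have h0 := hpre 0 (by simp)
    simp only [List.getElem_cons_zero, Nat.cast_zero, add_zero] at h0
    obtain ⟨a, hA, hperm', hs', hb'⟩ := pvStep M R acc i hs hb h0.1 h0.2
    simp only [List.foldl_cons, hA]
    apply ih (pvStepB M R i) (acc ++ [a]) hs' hb'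
    · exact (List.perm_append_singleton a acc).trans ((hp.cons a).trans hperm'.symm)
    · intro n hn
      have := hpre (n + 1) (by simpa using hn)
      simp only [List.getElem_cons_succ] at this
      have hlen : (pvStepB M R i).length = R.length + 1 := by
        rw [hperm'.length_eq]; rfl
      rw [hlen]
      push_cast at this ⊢
      constructor <;> omega



-- both nested loops, flattened to the single pop sequence pvSeq
lemma pvFoldA (M : Int) (idx_groups : List (List Int)) (init : List Int × List Int) :
    idx_groups.foldl (fun st idx_group =>
        ((PySem.List.slice? idx_group none none (-1)).getD []).foldl (pvStepA M) st) init
      = (pvSeq idx_groups).foldl (pvStepA M) init := by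
  simp only [PySem.List.slice?_none_none_neg_one, Option.getD_some]
  unfold pvSeq
  rw [List.foldl_flatten, List.foldl_map]

lemma pvFoldB (M : Int) (idx_groups : List (List Int)) (init : List Int) :
    idx_groups.foldl (fun removed g => g.reverse.foldl (pvStepB M) removed) init
      = (pvSeq idx_groups).foldl (pvStepB M) init := by
  unfold pvSeq
  rw [List.foldl_flatten, List.foldl_map]

lemma pvLenSum (l : List (List Int)) :
    (l.map (fun g => PySem.List.len g)).sum = (l.flatten.length : Int) := by
  simp only [PySem.List.len_eq, List.length_flatten]
  induction l with
  | nil => simp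
  | cons g gs ih => simp only [List.map_cons, List.sum_cons, ih]; push_cast; ring

lemma pv_spec_aux :
    ∀ (idx_groups : List (List Int)), Pre_combine_indices_to_remove idx_groups →
      combine_indices_to_remove idx_groups = combine_indices_to_remove_alt idx_groups := by
  intro idx_groups hpre
  rcases hpre with rfl | ⟨hne, hbound⟩
  · rfl
  have hgne : idx_groups ≠ [] := fun h => hne (by simp [h])
  obtain ⟨lim, hlim⟩ : ∃ lim, PySem.List.max? idx_groups.flatten (fun i => i) = some lim := by
    cases hmax : PySem.List.max? idx_groups.flatten (fun i => i) with
    | none => exact absurd ((PySem.List.max?_eq_none_iff _ _).mp hmax) hne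
    | some lim => exact ⟨lim, rfl⟩
  have hNsum := pvLenSum idx_groups
  unfold combine_indices_to_remove combine_indices_to_remove_alt
  rw [if_pos (by simpa [List.length_pos_iff] using hgne), if_neg hgne]
  simp only [hlim, hNsum]
  set M : Int := (idx_groups.flatten.length : Int) + lim with hMdef
  have hpvM : pvM idx_groups = M := by unfold pvM; rw [hlim]; rfl
  have hmain := pvMain M (pvSeq idx_groups) [] [] (by simp) (by simp) (List.Perm.refl [])
    (by
      intro n hn
      have := hbound n hn
      rw [hpvM] at this
      simpa using this)
  have hA : idx_groups.foldl (fun (st : List Int × List Int) idx_group =>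
        ((PySem.List.slice? idx_group none none (-1)).getD []).foldl
          (fun (st : List Int × List Int) i =>
            match PySem.List.pop? st.1 i with
            | none => st
            | some (elem, rest) =>
              match PySem.List.index? (PySem.List.pyRange 0 M 1) elem with
              | none => (rest, st.2)
              | some j => (rest, st.2 ++ [(j : Int)])) st)
        (PySem.List.pyRange 0 M 1, ([] : List Int)) = (pvSeq idx_groups).foldl (pvStepA M)
        (pvRem 0 M [], []) := by
    rw [pvRem_nil]
    exact pvFoldA M idx_groups _
  have hB : idx_groups.foldl (fun (removed : List Int) g =>
        g.reverse.foldl (fun removed r =>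
          let r' : Int := if r < 0 then r + (M - removed.length) else r
          let ap := removed.foldl
            (fun (ap : Int × Int) x => if x ≤ ap.1 then (ap.1 + 1, ap.2 + 1) else ap)
            (r', 0)
          PySem.List.insert removed ap.2 ap.1) removed) []
      = (pvSeq idx_groups).foldl (pvStepB M) [] := pvFoldB M idx_groups []
  rw [hA, hB]
  exact PySem.List.sorted_eq_of_perm_of_pairwise_lt _ _ _ hmain.2.1.symm hmain.2.2

-- ===== VERDICT =====
theorem combine_indices_to_remove_spec : Claim_equal_combine_indices_to_remove := by
  intro idx_groups _ hpre
  exact pv_spec_aux idx_groups hpre
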